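-- pv_equiv track=rewrite | github.com/alfa9317/Proyecto-Grafos | grafo.py | actualization
-- ===== SOURCE A (Python) =====
-- def actualization(dict):
--     if len(dict) != 0:
--         dict = {k: v for k, v in sorted(dict.items(), key=lambda item: item[1])}
--         d_i = dict.items()
--         first_i = list(d_i)[:1]
--         key = first_i[0][0]
--         value = first_i[0][1]
--         dict.pop(key)
--         return dict, key, value
--     else:
--         return False
-- ===== SOURCE B (Python) =====
-- def _bisect_right(ordered, v):
--     # hand-written bisect.bisect_right on the values of `ordered` (no imports in the original module)
--     lo, hi = 0, len(ordered)
--     while lo < hi: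
--         mid = (lo + hi) // 2
--         if v < ordered[mid][1]:
--             hi = mid
--         else:
--             lo = mid + 1
--     return lo
--
--
-- def actualization(dict):
--     if len(dict) == 0:
--         return False
--     ordered = []
--     for item in dict.items():
--         ordered.insert(_bisect_right(ordered, item[1]), item)
--     key, value = ordered[0]
--     return {k: v for k, v in ordered[1:]}, key, value
-- ===== Notes on version B (the rewrite author's own statement) =====
-- stated objective: alternative
-- what changed: B builds the value-ordered item list by stable binary insertion (a hand-written bisect_right finds each insertion point) instead of calling sorted, and returns head and tail of that list directly instead of rebuilding a dict and popping its first key; the input dict is never mutated.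
-- outside the precondition, e.g. on actualization({}): A returns False, B returns False
import Mathlib
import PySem

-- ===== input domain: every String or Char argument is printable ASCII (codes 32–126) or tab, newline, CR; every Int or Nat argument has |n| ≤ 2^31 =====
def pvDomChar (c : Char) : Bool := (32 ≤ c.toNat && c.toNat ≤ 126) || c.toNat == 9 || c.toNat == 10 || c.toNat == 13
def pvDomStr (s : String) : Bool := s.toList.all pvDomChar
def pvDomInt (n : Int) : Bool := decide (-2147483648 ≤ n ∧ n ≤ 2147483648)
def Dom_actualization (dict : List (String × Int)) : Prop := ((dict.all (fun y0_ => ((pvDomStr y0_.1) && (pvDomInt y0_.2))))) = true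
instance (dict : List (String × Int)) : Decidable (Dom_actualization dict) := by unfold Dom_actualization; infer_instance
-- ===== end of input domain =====

-- B replaces A's sort-rebuild-pop with stable binary insertion (hand-written bisect_right), returning
-- head and tail of the ordered item list directly (alternative algorithm, no speed claim; neither version mutates its argument).


-- ===== PORT A =====
def actualization (dict : List (String × Int)) : Option ((List (String × Int)) × String × Int) :=
  if dict.length ≠ 0 then
    -- dict = {k: v for k, v in sorted(dict.items(), key=lambda item: item[1])}
    let s := PySem.List.sorted dict (fun item => item.2) false
    let d := PySem.Dict.ofList s
    -- d_i = dict.items(); first_i = list(d_i)[:1]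
    let first_i := PySem.List.slice d.items none (some 1)
    -- key = first_i[0][0]; value = first_i[0][1]  (IndexError impossible: dict nonempty)
    match PySem.List.pyGet? first_i 0 with
    | none => none
    | some p =>
      let key := p.1
      let value := p.2
      -- dict.pop(key): key is present (it came from dict's items), so pop is erase here
      some ((d.erase key).items, key, value)
  else none

-- ===== PORT B =====
-- hand-written bisect_right loop from Source B (while lo < hi: mid = (lo+hi)//2; ...), fuel = initial hi,
-- exactly as PySem ports bisect; indices stay Nat (all nonnegative, // on nonnegatives is Nat division)
def bLoop (xs : List (String × Int)) (v : Int) : Nat → Nat → Nat → Nat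
  | 0, lo, _ => lo
  | fuel + 1, lo, hi =>
    if lo < hi then
      match xs[(lo + hi) / 2]? with
      | some y => if v < y.2 then bLoop xs v fuel lo ((lo + hi) / 2) else bLoop xs v fuel ((lo + hi) / 2 + 1) hi
      | none => lo
    else lo

def bBisect (xs : List (String × Int)) (v : Int) : Nat := bLoop xs v xs.length 0 xs.length

def actualization_alt (dict : List (String × Int)) : Option ((List (String × Int)) × String × Int) :=
  if dict.length = 0 then none
  else
    let ordered := dict.foldl
      (fun acc item => PySem.List.insert acc ((bBisect acc item.2 : Nat) : Int) item) []
    match ordered with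
    | [] => none   -- unreachable: ordered has the same elements as the nonempty dict
    | p :: rest => some ((PySem.Dict.ofList rest).items, p.1, p.2)

-- ===== PRECONDITION & SPEC =====
-- Pre_ excludes the empty dict, on which A returns False (not a value of the declared Optional-tuple
-- type), and association lists with duplicate keys: the Python argument is a dict, which cannot hold a
-- key twice, so such lists are an ambiguous representation (first vs last occurrence).
def Pre_actualization (dict : List (String × Int)) : Prop := dict ≠ [] ∧ (dict.map Prod.fst).Nodup
instance (dict : List (String × Int)) : Decidable (Pre_actualization dict) := by unfold Pre_actualization; infer_instance
def pvWitness_actualization : (List (String × Int)) := [("b", 3), ("a", 1), ("c", 2)]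

def Spec_actualization (dict : List (String × Int)) (out : Option ((List (String × Int)) × String × Int)) : Prop := out = actualization_alt dict
instance (dict : List (String × Int)) (out : Option ((List (String × Int)) × String × Int)) : Decidable (Spec_actualization dict out) := by unfold Spec_actualization; infer_instance

-- ===== CLAIM (what is proved, stated in full; the proofs are below) =====
def Claim_equal_actualization : Prop := ∀ (dict : List (String × Int)), Dom_actualization dict → Pre_actualization dict → Spec_actualization dict (actualization dict)

-- ===== LEMMAS AND PROOFS =====

-- B's hand-written bisect loop is PySem's bisectRightLoop on the list of values
theorem bLoop_eq_bisectRightLoop (xs : List (String × Int)) (v : Int) :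
    ∀ fuel lo hi, bLoop xs v fuel lo hi =
      PySem.List.bisectRightLoop (xs.map (fun p => p.2)) v fuel lo hi := by
  intro fuel
  induction fuel with
  | zero => intro lo hi; rfl
  | succ f ih =>
      intro lo hi
      simp only [bLoop, PySem.List.bisectRightLoop, List.getElem?_map]
      cases h : xs[(lo + hi) / 2]? with
      | none => simp
      | some y => simp [ih]

theorem bBisect_eq_bisectRight (xs : List (String × Int)) (v : Int) :
    bBisect xs v = PySem.List.bisectRight (xs.map (fun p => p.2)) v := by
  simp [bBisect, PySem.List.bisectRight, bLoop_eq_bisectRightLoop]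

-- inserting at an index characterised the bisect_right way is exactly insertBy's insertion point
theorem insertBy_eq_take_cons_drop (x : String × Int) :
    ∀ (acc : List (String × Int)) (i : Nat), i ≤ acc.length →
      (∀ j (hj : j < acc.length), j < i → acc[j].2 ≤ x.2) →
      (∀ j (hj : j < acc.length), i ≤ j → x.2 < acc[j].2) →
      PySem.List.insertBy (fun a b => decide (a.2 < b.2)) x acc = acc.take i ++ x :: acc.drop i := by
  intro acc
  induction acc with
  | nil => intro i hle _ _; simp at hle; subst hle; rfl
  | cons y t ih =>
      intro i hle hlt hge
      cases i with
      | zero =>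
          have hy : x.2 < y.2 := hge 0 (by simp) (by omega)
          simp [PySem.List.insertBy, hy]
      | succ i' =>
          have hy : y.2 ≤ x.2 := hlt 0 (by simp) (by omega)
          have := ih i' (by simpa using hle)
            (fun j hj hji => hlt (j + 1) (by simpa using hj) (by omega))
            (fun j hj hji => hge (j + 1) (by simpa using hj) (by omega))
          simp [PySem.List.insertBy, not_lt.mpr hy, this]

-- B's fold of bisect-inserts is A's sorted (stable insertion at the bisect_right position)
theorem foldl_bisect_insert_eq_sorted (l : List (String × Int)) :
    l.foldl (fun acc item => PySem.List.insert acc ((bBisect acc item.2 : Nat) : Int) item) [] =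
      PySem.List.sorted l (fun item => item.2) false := by
  induction l using List.reverseRecOn with
  | nil => rfl
  | append_singleton l x ih =>
      have hr : PySem.List.sorted (l ++ [x]) (fun item => item.2) false
          = PySem.List.insertBy (fun a b => decide (a.2 < b.2)) x
            (PySem.List.sorted l (fun item => item.2) false) := by
        rw [PySem.List.sorted_eq_foldl_insertBy, PySem.List.sorted_eq_foldl_insertBy,
          List.foldl_append]
        simp only [List.foldl_cons, List.foldl_nil]
      rw [List.foldl_append, ih, hr]
      simp only [List.foldl_cons, List.foldl_nil]
      have hpw : ((PySem.List.sorted l (fun item => item.2) false).map (fun p => p.2)).Pairwise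
          (fun a b => a ≤ b) :=
        List.pairwise_map.mpr (PySem.List.sorted_pairwise l (fun item => item.2))
      obtain ⟨hle, hlt, hge⟩ :=
        PySem.List.bisectRight_spec ((PySem.List.sorted l (fun item => item.2) false).map
          (fun p => p.2)) x.2 hpw
      rw [bBisect_eq_bisectRight]
      rw [PySem.List.insert_natCast _ _ _ (by simpa using hle)]
      refine (insertBy_eq_take_cons_drop x _ _ (by simpa using hle) ?_ ?_).symm
      · intro j hj hji
        have := hlt j (by simpa using hj) hji
        simpa using this
      · intro j hj hji
        have := hge j (by simpa using hj) hji
        simpa using this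

-- a dict built from a duplicate-free pair list has exactly that items list
theorem ofList_items_of_nodup {l : List (String × Int)} (h : (l.map Prod.fst).Nodup) :
    (PySem.Dict.ofList l).items = l := by
  have := PySem.Dict.items_foldl_insert_fresh l Prod.fst Prod.snd PySem.Dict.empty
    (by intro a _; simp [PySem.Dict.contains_empty]) h
  simpa [PySem.Dict.ofList, PySem.Dict.update, PySem.Dict.empty] using this

theorem actualization_spec : Claim_equal_actualization := by
  intro dict _ hpre
  obtain ⟨hne, hpre⟩ := hpre
  unfold Spec_actualization actualization actualization_alt
  · have hlen0 : ¬ dict.length = 0 := by simpa using hne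
    have hperm : (PySem.List.sorted dict (fun item => item.2) false).Perm dict :=
      PySem.List.sorted_perm dict (fun item => item.2) false
    have hnodup : ((PySem.List.sorted dict (fun item => item.2) false).map Prod.fst).Nodup :=
      ((hperm.map Prod.fst).nodup_iff).mpr hpre
    have hsne : PySem.List.sorted dict (fun item => item.2) false ≠ [] := by
      rw [Ne, PySem.List.sorted_eq_nil_iff]; exact hne
    have hord := foldl_bisect_insert_eq_sorted dict
    obtain ⟨p, tl, hstl⟩ := List.exists_cons_of_ne_nil hsne
    have hnodup' : (List.map Prod.fst (p :: tl)).Nodup := hstl ▸ hnodup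
    have hcons : (p.1 :: tl.map Prod.fst).Nodup := by simpa using hnodup'
    have hpnotin : p.1 ∉ tl.map Prod.fst := (List.nodup_cons.mp hcons).1
    have hitems : (PySem.Dict.ofList (p :: tl)).items = p :: tl :=
      ofList_items_of_nodup hnodup'
    have htlitems : (PySem.Dict.ofList tl).items = tl :=
      ofList_items_of_nodup (by simpa using (List.nodup_cons.mp hcons).2)
    have hfilter : tl.filter (fun q => !(q.1 == p.1)) = tl := by
      apply List.filter_eq_self.mpr
      intro q hq
      simp only [Bool.not_eq_eq_eq_not, Bool.not_true, beq_eq_false_iff_ne, ne_eq]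
      intro hq1; exact hpnotin (hq1 ▸ List.mem_map_of_mem hq)
    simp only [hlen0, if_false, ite_not, hord, hstl, htlitems]
    rw [show ((some 1 : Option Int)) = some ((1:Nat):Int) by norm_num,
      PySem.List.slice_to_natCast]
    simp [PySem.List.pyGet?, PySem.List.pyIdx?, PySem.Dict.erase, hitems, hfilter]
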